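-- pv_equiv track=rewrite | github.com/selfreferencing/erdos-86-lean | Zeroless/exp56_forced_zero_lemma.py | find_entry_exit_positions
-- ===== SOURCE A (Python) =====
-- def find_entry_exit_positions(cyl):
--     """Find positions of entry and exit witnesses."""
--     entry_pos = []
--     exit_pos = []
--
--     for i in range(len(cyl) - 1):
--         if cyl[i] in '2468' and cyl[i+1] == '1':
--             entry_pos.append(i)
--         if cyl[i] == '5' and cyl[i+1] in '1234':
--             exit_pos.append(i)
--
--     return entry_pos, exit_pos
-- ===== SOURCE B (Python) =====
-- def find_entry_exit_positions(cyl):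
--     """Find positions of entry and exit witnesses."""
--     # Jump between occurrences of the anchor characters with str.find instead
--     # of scanning every index: entries are anchored on the '1' (look back one
--     # char), exits on the '5' (look ahead one char).
--     entry_pos = []
--     j = cyl.find('1', 1)
--     while j != -1:
--         if cyl[j - 1] in '2468':
--             entry_pos.append(j - 1)
--         j = cyl.find('1', j + 1)
--     exit_pos = []
--     i = cyl.find('5')
--     while i != -1:
--         if i + 1 < len(cyl) and cyl[i + 1] in '1234':
--             exit_pos.append(i)
--         i = cyl.find('5', i + 1)
--     return entry_pos, exit_pos
-- ===== Notes on version B (the rewrite author's own statement) =====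
-- stated objective: faster
-- what changed: Replaces the single scan over every index testing both pair patterns with two str.find-driven search loops that jump between occurrences of anchor characters ('1' for entries, looking back one char; '5' for exits, looking ahead), so per-position work moves into the C-level substring search.
import Mathlib
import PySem

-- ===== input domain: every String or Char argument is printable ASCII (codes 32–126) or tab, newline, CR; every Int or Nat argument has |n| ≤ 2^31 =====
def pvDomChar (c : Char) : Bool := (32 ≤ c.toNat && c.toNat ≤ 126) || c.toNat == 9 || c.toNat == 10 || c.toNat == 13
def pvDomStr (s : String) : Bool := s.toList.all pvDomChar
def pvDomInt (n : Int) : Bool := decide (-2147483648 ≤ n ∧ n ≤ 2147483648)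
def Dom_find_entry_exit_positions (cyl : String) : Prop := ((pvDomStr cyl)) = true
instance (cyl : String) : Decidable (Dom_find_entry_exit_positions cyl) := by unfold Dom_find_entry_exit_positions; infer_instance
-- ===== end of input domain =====

-- one line: B replaces A's every-index pair scan by two str.find-driven loops that jump
-- between occurrences of the anchor characters ('1' looking back, '5' looking ahead); measured faster (constant factor).

-- ===== PORT A =====
def find_entry_exit_positions (cyl : String) : List Int × List Int :=
  let l := cyl.toList
  (PySem.List.pyRange 0 ((l.length : Int) - 1) 1).foldl
    (fun (st : List Int × List Int) i =>
      let st1 :=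
        if PySem.List.pyGetD l i ' ' ∈ ['2','4','6','8'] ∧ PySem.List.pyGetD l (i+1) ' ' = '1'
        then (st.1 ++ [i], st.2) else st
      if PySem.List.pyGetD l i ' ' = '5' ∧ PySem.List.pyGetD l (i+1) ' ' ∈ ['1','2','3','4']
      then (st1.1, st1.2 ++ [i]) else st1)
    ([], [])

-- ===== PORT B =====
-- termination facts for the find-driven while loops (cited by the ports' decreasing_by)
theorem pvFindFrom_gt_len (l sub : List Char) (s : Nat) (h : l.length < s) :
    PySem.Chars.findFrom l sub (s : Int) none = -1 := by
  simp only [PySem.Chars.findFrom]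
  have h1 : ¬ ((s : Int) < 0) := by omega
  simp only [if_neg h1]
  rw [if_pos (by exact_mod_cast h)]

theorem pvFindFrom_ge (l sub : List Char) (s : Nat)
    (h : PySem.Chars.findFrom l sub (s : Int) none ≠ -1) :
    s ≤ (PySem.Chars.findFrom l sub (s : Int) none).toNat ∧ s ≤ l.length := by
  by_cases hs : s ≤ l.length
  · have := (PySem.Chars.findFrom_natCast_spec l sub s hs h).1
    exact ⟨by omega, hs⟩
  · exact absurd (pvFindFrom_gt_len l sub s (by omega)) h

-- while loop of B for entries: anchor '1' found with str.find, look back one char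
def pvEntryLoop (l : List Char) (s : Nat) : List Int :=
  if h : PySem.Chars.findFrom l ['1'] (s : Int) none = -1 then []
  else
    (if PySem.List.pyGetD l (PySem.Chars.findFrom l ['1'] (s : Int) none - 1) ' ' ∈ ['2','4','6','8']
     then [PySem.Chars.findFrom l ['1'] (s : Int) none - 1] else []) ++
    pvEntryLoop l ((PySem.Chars.findFrom l ['1'] (s : Int) none).toNat + 1)
termination_by l.length + 1 - s
decreasing_by
  have := pvFindFrom_ge l ['1'] s h
  omega

-- while loop of B for exits: anchor '5' found with str.find, look ahead one char
def pvExitLoop (l : List Char) (s : Nat) : List Int :=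
  if h : PySem.Chars.findFrom l ['5'] (s : Int) none = -1 then []
  else
    (if PySem.Chars.findFrom l ['5'] (s : Int) none + 1 < (l.length : Int) ∧
        PySem.List.pyGetD l (PySem.Chars.findFrom l ['5'] (s : Int) none + 1) ' ' ∈ ['1','2','3','4']
     then [PySem.Chars.findFrom l ['5'] (s : Int) none] else []) ++
    pvExitLoop l ((PySem.Chars.findFrom l ['5'] (s : Int) none).toNat + 1)
termination_by l.length + 1 - s
decreasing_by
  have := pvFindFrom_ge l ['5'] s h
  omega

def find_entry_exit_positions_alt (cyl : String) : List Int × List Int :=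
  (pvEntryLoop cyl.toList 1, pvExitLoop cyl.toList 0)

-- ===== PRECONDITION & SPEC =====
def Spec_find_entry_exit_positions (cyl : String) (out : List Int × List Int) : Prop := out = find_entry_exit_positions_alt cyl
instance (cyl : String) (out : List Int × List Int) : Decidable (Spec_find_entry_exit_positions cyl out) := by unfold Spec_find_entry_exit_positions; infer_instance

-- ===== CLAIM (what is proved, stated in full; the proofs are below) =====
def Claim_equal_find_entry_exit_positions : Prop := ∀ (cyl : String), Dom_find_entry_exit_positions cyl → Spec_find_entry_exit_positions cyl (find_entry_exit_positions cyl)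

-- ===== LEMMAS AND PROOFS =====

theorem pv_prefix_singleton (c : Char) (xs : List Char) :
    [c] <+: xs ↔ xs.head? = some c := by
  cases xs with
  | nil => simp
  | cons x t => simp [List.cons_prefix_cons, eq_comm]

theorem pv_infix_singleton (c : Char) (xs : List Char) :
    [c] <:+: xs ↔ c ∈ xs := by
  constructor
  · rintro ⟨u, v, rfl⟩; simp
  · intro h
    obtain ⟨u, v, rfl⟩ := List.append_of_mem h
    exact ⟨u, v, by simp⟩

theorem pv_prefix_at (c : Char) (l : List Char) (j : Nat) :
    [c] <+: l.drop j ↔ l[j]? = some c := by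
  rw [pv_prefix_singleton, List.head?_drop]

theorem pv_flatMap_congr {α β : Type} (l : List α) (f g : α → List β)
    (h : ∀ x ∈ l, f x = g x) : l.flatMap f = l.flatMap g := by
  induction l with
  | nil => rfl
  | cons x t ih =>
    simp only [List.flatMap_cons, h x (by simp), ih (fun y hy => h y (by simp [hy]))]

-- characterization of a find-driven loop: it collects E j over all anchor positions j ≥ s
theorem pv_loop_char (l : List Char) (c : Char) (E : Int → List Int)
    (F : Nat → List Int)
    (hF : ∀ s : Nat,
      F s = if PySem.Chars.findFrom l [c] (s : Int) none = -1 then []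
            else E (PySem.Chars.findFrom l [c] (s : Int) none) ++
                 F ((PySem.Chars.findFrom l [c] (s : Int) none).toNat + 1)) :
    ∀ s : Nat, s ≤ l.length →
      F s = (List.range' s (l.length - s)).flatMap
          (fun (j : Nat) => if l[j]? = some c then E (j : Int) else []) := by
  have main : ∀ (fuel s : Nat), l.length - s ≤ fuel → s ≤ l.length →
      F s = (List.range' s (l.length - s)).flatMap
          (fun (j : Nat) => if l[j]? = some c then E (j : Int) else []) := by
    intro fuel
    induction fuel with
    | zero =>
      intro s hf hs
      have hs' : s = l.length := by omega
      subst hs'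
      have hneg : PySem.Chars.findFrom l [c] ((l.length : Nat) : Int) none = -1 := by
        rw [PySem.Chars.findFrom_natCast_eq_neg_one_iff l [c] l.length (le_refl _)]
        simp
      rw [hF, if_pos hneg]
      simp
    | succ fuel ih =>
      intro s hf hs
      rw [hF]
      by_cases h : PySem.Chars.findFrom l [c] (s : Int) none = -1
      · -- no anchor at or after s: every j in range is not an anchor
        rw [if_pos h]
        symm
        rw [List.flatMap_eq_nil_iff]
        intro j hj
        rw [List.mem_range'_1] at hj
        rw [if_neg]
        intro hjc
        rw [PySem.Chars.findFrom_natCast_eq_neg_one_iff l [c] s hs] at h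
        apply h
        rw [pv_infix_singleton]
        have : (l.drop s)[j - s]? = some c := by
          rw [List.getElem?_drop]
          have : s + (j - s) = j := by omega
          rw [this]; exact hjc
        exact List.mem_of_getElem? this
      · rw [if_neg h]
        obtain ⟨hge, hat, hmin⟩ := PySem.Chars.findFrom_natCast_spec l [c] s hs h
        set j0 : Int := PySem.Chars.findFrom l [c] (s : Int) none with hj0
        have hj0nn : 0 ≤ j0 := le_trans (by positivity) hge
        set t : Nat := j0.toNat with ht
        have hcast : (t : Int) = j0 := Int.toNat_of_nonneg hj0nn
        have hst : s ≤ t := by omega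
        have hatc : l[t]? = some c := (pv_prefix_at c l t).mp hat
        have htlt : t < l.length := by
          by_contra hge'
          rw [List.getElem?_eq_none (by omega)] at hatc
          simp at hatc
        -- split the index range at t
        have hsplit : List.range' s (l.length - s)
            = List.range' s (t - s) ++ (t :: List.range' (t + 1) (l.length - (t + 1))) := by
          have h1 : List.range' s (t - s) ++ List.range' (s + 1 * (t - s)) (l.length - t)
              = List.range' s ((t - s) + (l.length - t)) := List.range'_append
          have h2 : s + 1 * (t - s) = t := by omega
          have h3 : (t - s) + (l.length - t) = l.length - s := by omega
          have h4 : l.length - t = (l.length - (t + 1)) + 1 := by omega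
          rw [h2, h3] at h1
          rw [← h1, h4, List.range'_succ]
        rw [hsplit, List.flatMap_append, List.flatMap_cons]
        have hfirst : (List.range' s (t - s)).flatMap
            (fun (j : Nat) => if l[j]? = some c then E (j : Int) else []) = [] := by
          rw [List.flatMap_eq_nil_iff]
          intro j hj
          rw [List.mem_range'_1] at hj
          rw [if_neg]
          intro hjc
          exact hmin j (by omega) (by omega) ((pv_prefix_at c l j).mpr hjc)
        rw [hfirst, if_pos hatc, List.nil_append, hcast]
        congr 1
        exact ih (t + 1) (by omega) (by omega)
  intro s hs
  exact main (l.length - s) s (le_refl _) hs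

-- the unfolding equations of the two loops, in the shape pv_loop_char consumes
theorem pvEntryLoop_eq (l : List Char) (s : Nat) :
    pvEntryLoop l s
      = if PySem.Chars.findFrom l ['1'] (s : Int) none = -1 then []
        else (fun j : Int => if PySem.List.pyGetD l (j - 1) ' ' ∈ ['2','4','6','8']
                             then [j - 1] else [])
               (PySem.Chars.findFrom l ['1'] (s : Int) none) ++
             pvEntryLoop l ((PySem.Chars.findFrom l ['1'] (s : Int) none).toNat + 1) := by
  rw [pvEntryLoop]
  split <;> rfl

theorem pvExitLoop_eq (l : List Char) (s : Nat) :
    pvExitLoop l s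
      = if PySem.Chars.findFrom l ['5'] (s : Int) none = -1 then []
        else (fun j : Int => if j + 1 < (l.length : Int) ∧
                                PySem.List.pyGetD l (j + 1) ' ' ∈ ['1','2','3','4']
                             then [j] else [])
               (PySem.Chars.findFrom l ['5'] (s : Int) none) ++
             pvExitLoop l ((PySem.Chars.findFrom l ['5'] (s : Int) none).toNat + 1) := by
  rw [pvExitLoop]
  split <;> rfl

-- A's two-list accumulator fold splits into two independent flatMaps
theorem pv_fold_split (l : List Char) (idxs : List Int) (a1 a2 : List Int) :
    idxs.foldl
      (fun (st : List Int × List Int) i =>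
        let st1 :=
          if PySem.List.pyGetD l i ' ' ∈ ['2','4','6','8'] ∧ PySem.List.pyGetD l (i+1) ' ' = '1'
          then (st.1 ++ [i], st.2) else st
        if PySem.List.pyGetD l i ' ' = '5' ∧ PySem.List.pyGetD l (i+1) ' ' ∈ ['1','2','3','4']
        then (st1.1, st1.2 ++ [i]) else st1)
      (a1, a2)
    = (a1 ++ idxs.flatMap (fun i =>
          if PySem.List.pyGetD l i ' ' ∈ ['2','4','6','8'] ∧ PySem.List.pyGetD l (i+1) ' ' = '1'
          then [i] else []),
       a2 ++ idxs.flatMap (fun i =>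
          if PySem.List.pyGetD l i ' ' = '5' ∧ PySem.List.pyGetD l (i+1) ' ' ∈ ['1','2','3','4']
          then [i] else [])) := by
  induction idxs generalizing a1 a2 with
  | nil => simp
  | cons i t ih =>
    rw [List.foldl_cons, List.flatMap_cons, List.flatMap_cons]
    have hstep : ∀ b1 b2 : List Int,
        (let st1 :=
          if PySem.List.pyGetD l i ' ' ∈ ['2','4','6','8'] ∧ PySem.List.pyGetD l (i+1) ' ' = '1'
          then ((b1, b2).1 ++ [i], (b1, b2).2) else (b1, b2)
        if PySem.List.pyGetD l i ' ' = '5' ∧ PySem.List.pyGetD l (i+1) ' ' ∈ ['1','2','3','4']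
        then (st1.1, st1.2 ++ [i]) else st1)
        = ((b1 ++ if PySem.List.pyGetD l i ' ' ∈ ['2','4','6','8'] ∧ PySem.List.pyGetD l (i+1) ' ' = '1' then [i] else [],
            b2 ++ if PySem.List.pyGetD l i ' ' = '5' ∧ PySem.List.pyGetD l (i+1) ' ' ∈ ['1','2','3','4'] then [i] else []) : List Int × List Int) := by
      intro b1 b2
      split_ifs <;> simp_all
    rw [hstep, ih]
    split_ifs <;> simp_all
  -- entry-side bridge: B's look-back condition at j = 1 + k matches A's condition at k

theorem pv_getD_iff (l : List Char) (k : Nat) (c : Char) (hk : k < l.length) :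
    l[k]? = some c ↔ l.getD k ' ' = c := by
  rw [List.getElem?_eq_getElem hk, List.getD_eq_getElem _ _ hk, Option.some_inj]

theorem pv_entry_eq (l : List Char) (hl : 1 ≤ l.length) :
    pvEntryLoop l 1
      = (PySem.List.pyRange 0 ((l.length : Int) - 1) 1).flatMap (fun i =>
          if PySem.List.pyGetD l i ' ' ∈ ['2','4','6','8'] ∧ PySem.List.pyGetD l (i+1) ' ' = '1'
          then [i] else []) := by
  rw [pv_loop_char l '1'
      (fun j : Int => if PySem.List.pyGetD l (j - 1) ' ' ∈ ['2','4','6','8'] then [j - 1] else [])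
      (pvEntryLoop l) (pvEntryLoop_eq l) 1 hl]
  rw [PySem.List.pyRange_one]
  simp only [sub_zero, zero_add]
  have hrange : List.range' 1 (l.length - 1)
      = (List.range (((l.length : Int) - 1).toNat)).map (1 + ·) := by
    rw [List.range'_eq_map_range]
    have hm : ((l.length : Int) - 1).toNat = l.length - 1 := by omega
    rw [hm]
  rw [hrange, List.flatMap_map, List.flatMap_map]
  apply pv_flatMap_congr
  intro k hk
  rw [List.mem_range] at hk
  have hk1 : 1 + k < l.length := by omega
  have hc1 : ((1 + k : Nat) : Int) - 1 = ((k : Nat) : Int) := by push_cast; ring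
  have hc2 : ((k : Nat) : Int) + 1 = ((1 + k : Nat) : Int) := by push_cast; ring
  simp only [hc1, hc2, PySem.List.pyGetD_natCast, pv_getD_iff l (1 + k) '1' hk1]
  split_ifs <;> first | rfl | tauto

theorem pv_exit_eq (l : List Char) :
    pvExitLoop l 0
      = (PySem.List.pyRange 0 ((l.length : Int) - 1) 1).flatMap (fun i =>
          if PySem.List.pyGetD l i ' ' = '5' ∧ PySem.List.pyGetD l (i+1) ' ' ∈ ['1','2','3','4']
          then [i] else []) := by
  rw [pv_loop_char l '5'
      (fun j : Int => if j + 1 < (l.length : Int) ∧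
            PySem.List.pyGetD l (j + 1) ' ' ∈ ['1','2','3','4'] then [j] else [])
      (pvExitLoop l) (pvExitLoop_eq l) 0 (Nat.zero_le _)]
  rw [PySem.List.pyRange_one]
  simp only [sub_zero, zero_add]
  rcases Nat.eq_zero_or_pos l.length with h0 | hpos
  · rw [List.length_eq_zero_iff] at h0
    subst h0
    rfl
  · -- split the index range: the last index can never fire B's exit guard
    have hm : ((l.length : Int) - 1).toNat = l.length - 1 := by omega
    have hr : List.range l.length = List.range (l.length - 1) ++ [l.length - 1] := by
      conv_lhs => rw [show l.length = (l.length - 1) + 1 from by omega]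
      rw [List.range_succ]
    have hsplit : List.range' 0 (l.length - 0)
        = List.range (((l.length : Int) - 1).toNat) ++ [l.length - 1] := by
      rw [Nat.sub_zero, ← List.range_eq_range', hr, hm]
    rw [hsplit, List.flatMap_append, List.flatMap_map]
    have hlast : [l.length - 1].flatMap
        (fun (j : Nat) => if l[j]? = some '5'
          then (if (j : Int) + 1 < (l.length : Int) ∧
              PySem.List.pyGetD l ((j : Int) + 1) ' ' ∈ ['1','2','3','4'] then [(j : Int)] else [])
          else []) = [] := by
      rw [List.flatMap_cons, List.flatMap_nil, List.append_nil]
      have hnl : ¬ (((l.length - 1 : Nat) : Int) + 1 < (l.length : Int)) := by omega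
      split_ifs <;> first | rfl | tauto
    rw [hlast, List.append_nil]
    apply pv_flatMap_congr
    intro k hk
    rw [List.mem_range] at hk
    have hkl : k < l.length := by omega
    have hklt : ((k + 1 : Nat) : Int) < (l.length : Int) := by
      have : k + 1 < l.length := by omega
      exact_mod_cast this
    have hc2 : ((k : Nat) : Int) + 1 = ((k + 1 : Nat) : Int) := by push_cast; ring
    simp only [hc2, PySem.List.pyGetD_natCast, pv_getD_iff l k '5' hkl]
    split_ifs <;> first | rfl | tauto

-- ===== VERDICT (by name: the statement is the Claim_ definition above) =====
theorem find_entry_exit_positions_spec : Claim_equal_find_entry_exit_positions := by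
  intro cyl _
  unfold Spec_find_entry_exit_positions find_entry_exit_positions find_entry_exit_positions_alt
  simp only []
  rw [pv_fold_split cyl.toList]
  rcases Nat.eq_zero_or_pos cyl.toList.length with h0 | hpos
  · rw [List.length_eq_zero_iff] at h0
    rw [h0]
    have e1 : pvEntryLoop [] 1 = [] := by
      rw [pvEntryLoop_eq, if_pos (pvFindFrom_gt_len [] ['1'] 1 (by simp))]
    have e2 : pvExitLoop [] 0 = [] := by
      have hneg : PySem.Chars.findFrom [] ['5'] ((0 : Nat) : Int) none = -1 := by
        rw [PySem.Chars.findFrom_natCast_eq_neg_one_iff [] ['5'] 0 (by simp)]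
        simp
      rw [pvExitLoop_eq, if_pos hneg]
    rw [e1, e2]
    simp
  · rw [pv_entry_eq cyl.toList hpos, pv_exit_eq cyl.toList]
    simp
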